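-- pv_equiv track=rewrite | github.com/peacepassos1-lab/Steps-Terminal | app.py | get_sentiment_score
-- ===== SOURCE A (Python) =====
-- def get_sentiment_score(news_list):
--     bullish = ['surge', 'growth', 'profit', 'buy', 'upbeat', 'expansion', 'dividend']
--     bearish = ['drop', 'lawsuit', 'miss', 'sell', 'risk', 'decline', 'investigation']
--     score = 0
--     for item in news_list:
--         h = item['headline'].lower()
--         score += sum(1 for w in bullish if w in h)
--         score -= sum(1 for w in bearish if w in h)
--     return score
-- ===== SOURCE B (Python) =====
-- def get_sentiment_score(news_list):
--     bullish = ['surge', 'growth', 'profit', 'buy', 'upbeat', 'expansion', 'dividend']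
--     bearish = ['drop', 'lawsuit', 'miss', 'sell', 'risk', 'decline', 'investigation']
--     weights = {w: 1 for w in bullish}
--     for w in bearish:
--         weights[w] = -1
--     # first-character index: single left-to-right scan of each headline finds
--     # every keyword occurrence (multi-pattern matching), instead of one
--     # substring search per keyword
--     index = {}
--     for w in weights:
--         index.setdefault(w[0], []).append(w)
--     score = 0
--     for item in news_list:
--         h = item['headline'].lower()
--         found = []
--         for i, c in enumerate(h):
--             for w in index.get(c, []):
--                 if w not in found and h.startswith(w, i):
--                     found.append(w)
--         score += sum(weights[w] for w in found)
--     return score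
-- ===== Notes on version B (the rewrite author's own statement) =====
-- stated objective: alternative
-- what changed: B replaces A's per-keyword substring searches with single-pass multi-pattern matching: it builds one signed weight table and a first-character index of the keywords, scans each lowered headline left to right once, collecting the set of keywords found at any position, and adds their weights.
import Mathlib
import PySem

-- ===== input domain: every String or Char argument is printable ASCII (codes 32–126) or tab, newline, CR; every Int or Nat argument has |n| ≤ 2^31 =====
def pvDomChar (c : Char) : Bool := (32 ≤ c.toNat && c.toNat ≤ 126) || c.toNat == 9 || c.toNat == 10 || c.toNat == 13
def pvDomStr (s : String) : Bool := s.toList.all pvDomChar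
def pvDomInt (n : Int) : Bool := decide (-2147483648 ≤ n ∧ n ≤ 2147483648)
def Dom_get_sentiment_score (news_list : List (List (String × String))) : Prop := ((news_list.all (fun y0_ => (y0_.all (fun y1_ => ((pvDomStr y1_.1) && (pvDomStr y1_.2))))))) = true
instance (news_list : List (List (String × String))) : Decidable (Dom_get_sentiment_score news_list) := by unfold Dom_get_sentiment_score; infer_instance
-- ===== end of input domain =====

-- B replaces A's one-substring-search-per-keyword with single-pass multi-pattern matching:
-- one signed weight table, a first-character index of the keywords, and one left-to-right
-- scan per headline collecting the keywords that occur (objective: alternative).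
-- Pre_ excludes items without a 'headline' key, on which the Python A raises KeyError.

-- ===== PORT A =====
def get_sentiment_score (news_list : List (List (String × String))) : Int :=
  let bullish : List String := ["surge", "growth", "profit", "buy", "upbeat", "expansion", "dividend"]
  let bearish : List String := ["drop", "lawsuit", "miss", "sell", "risk", "decline", "investigation"]
  news_list.foldl (fun score item =>
    -- item['headline']: Pre_ guarantees the key is present, so the .getD "" default is unreachable
    let h := PySem.Str.lower (((PySem.Dict.mk item).get? "headline").getD "")
    let score := score + (bullish.map (fun w => if PySem.Str.isIn w h then (1 : Int) else 0)).sum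
    score - (bearish.map (fun w => if PySem.Str.isIn w h then (1 : Int) else 0)).sum) 0

-- ===== PORT B =====
def get_sentiment_score_alt (news_list : List (List (String × String))) : Int :=
  let bullish : List String := ["surge", "growth", "profit", "buy", "upbeat", "expansion", "dividend"]
  let bearish : List String := ["drop", "lawsuit", "miss", "sell", "risk", "decline", "investigation"]
  let weights := bearish.foldl (fun d w => d.insert w (-1 : Int))
    (bullish.foldl (fun d w => d.insert w (1 : Int)) PySem.Dict.empty)
  -- index.setdefault(w[0], []).append(w)  =  modify w[0] [] (· ++ [w]); w[0] exists (no keyword is empty)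
  let index := weights.keys.foldl
    (fun d w => d.modify ((PySem.Str.pyGet? w 0).getD ' ') [] (fun l => l ++ [w]))
    (PySem.Dict.empty : PySem.Dict Char (List String))
  news_list.foldl (fun score item =>
    -- item['headline']: Pre_ guarantees the key is present, so the .getD "" default is unreachable
    let hc := (PySem.Str.lower (((PySem.Dict.mk item).get? "headline").getD "")).toList
    let found := (PySem.List.enumerate hc).foldl (fun found p =>
      ((index.get? p.2).getD []).foldl (fun found w =>
        -- h.startswith(w, i) with i = p.1 ≥ 0 (from enumerate) is exactly startswith on hc.drop i
        if !found.contains w && PySem.Chars.startswith (hc.drop p.1.toNat) w.toList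
        then found ++ [w] else found) found) ([] : List String)
    -- sum(weights[w] for w in found): every w in found is a key, so the .getD 0 default is unreachable
    score + (found.map (fun w => weights.getD w 0)).sum) 0

-- ===== PRECONDITION & SPEC =====
-- Pre_ excludes exactly the items with no 'headline' key: there the Python A raises KeyError.
def Pre_get_sentiment_score (news_list : List (List (String × String))) : Prop :=
  (news_list.all (fun item => item.any (fun p => p.1 == "headline"))) = true
instance (news_list : List (List (String × String))) : Decidable (Pre_get_sentiment_score news_list) := by
  unfold Pre_get_sentiment_score; infer_instance
def pvWitness_get_sentiment_score : (List (List (String × String))) :=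
  [[("headline", "Profit surge, no risk")], [("headline", "Lawsuit miss"), ("src", "x")]]

def Spec_get_sentiment_score (news_list : List (List (String × String))) (out : Int) : Prop := out = get_sentiment_score_alt news_list
instance (news_list : List (List (String × String))) (out : Int) : Decidable (Spec_get_sentiment_score news_list out) := by unfold Spec_get_sentiment_score; infer_instance

-- ===== CLAIM (what is proved, stated in full; the proofs are below) =====
def Claim_equal_get_sentiment_score : Prop := ∀ (news_list : List (List (String × String))), Dom_get_sentiment_score news_list → Pre_get_sentiment_score news_list → Spec_get_sentiment_score news_list (get_sentiment_score news_list)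

-- ===== LEMMAS AND PROOFS =====

def pvBull : List String := ["surge", "growth", "profit", "buy", "upbeat", "expansion", "dividend"]
def pvBear : List String := ["drop", "lawsuit", "miss", "sell", "risk", "decline", "investigation"]
def pvKws : List String := pvBull ++ pvBear

def pvWD : PySem.Dict String Int :=
  pvBear.foldl (fun d w => d.insert w (-1 : Int))
    (pvBull.foldl (fun d w => d.insert w (1 : Int)) PySem.Dict.empty)

def pvIdx : PySem.Dict Char (List String) :=
  pvWD.keys.foldl
    (fun d w => d.modify ((PySem.Str.pyGet? w 0).getD ' ') [] (fun l => l ++ [w]))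
    (PySem.Dict.empty : PySem.Dict Char (List String))

def pvFound (hc : List Char) : List String :=
  (PySem.List.enumerate hc).foldl (fun found p =>
    ((pvIdx.get? p.2).getD []).foldl (fun found w =>
      if !found.contains w && PySem.Chars.startswith (hc.drop p.1.toNat) w.toList
      then found ++ [w] else found) found) ([] : List String)

def pvInd (w : String) (hc : List Char) : Int := if PySem.Chars.isIn w.toList hc then 1 else 0

lemma kws_nonempty : ∀ w ∈ pvKws, w.toList ≠ [] := by decide
lemma kws_nodup : pvKws.Nodup := by decide
lemma wd_bull : ∀ w ∈ pvBull, pvWD.getD w 0 = 1 := by decide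
lemma wd_bear : ∀ w ∈ pvBear, pvWD.getD w 0 = -1 := by decide

lemma alt_eq (nl : List (List (String × String))) :
    get_sentiment_score_alt nl = nl.foldl (fun score item =>
      score + ((pvFound (PySem.Str.lower (((PySem.Dict.mk item).get? "headline").getD "")).toList).map
        (fun w => pvWD.getD w 0)).sum) 0 := rfl

lemma a_eq (nl : List (List (String × String))) :
    get_sentiment_score nl = nl.foldl (fun score item =>
      score + ((pvBull.map (fun w => pvInd w (PySem.Str.lower (((PySem.Dict.mk item).get? "headline").getD "")).toList)).sum
        - (pvBear.map (fun w => pvInd w (PySem.Str.lower (((PySem.Dict.mk item).get? "headline").getD "")).toList)).sum)) 0 := by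
  simp only [get_sentiment_score, pvInd, pvBull, pvBear, PySem.Str.isIn_eq]
  congr 1
  funext score item
  ring_nf

lemma idx_eq : pvIdx = PySem.Dict.mk
    [('s', ["surge", "sell"]), ('g', ["growth"]), ('p', ["profit"]), ('b', ["buy"]),
     ('u', ["upbeat"]), ('e', ["expansion"]), ('d', ["dividend", "drop", "decline"]),
     ('l', ["lawsuit"]), ('m', ["miss"]), ('r', ["risk"]), ('i', ["investigation"])] := by rfl

-- the first-character index groups the keywords by their first character, keeping order
lemma idx_getD (c : Char) :
    (pvIdx.get? c).getD [] = pvKws.filter (fun w => w.toList.head? == some c) := by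
  rw [idx_eq]
  simp only [PySem.Dict.get?_mk_cons]
  by_cases h1 : 's' = c; · subst h1; decide
  by_cases h2 : 'g' = c; · subst h2; decide
  by_cases h3 : 'p' = c; · subst h3; decide
  by_cases h4 : 'b' = c; · subst h4; decide
  by_cases h5 : 'u' = c; · subst h5; decide
  by_cases h6 : 'e' = c; · subst h6; decide
  by_cases h7 : 'd' = c; · subst h7; decide
  by_cases h8 : 'l' = c; · subst h8; decide
  by_cases h9 : 'm' = c; · subst h9; decide
  by_cases h10 : 'r' = c; · subst h10; decide
  by_cases h11 : 'i' = c; · subst h11; decide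
  rw [show (List.filter (fun w => w.toList.head? == some c) pvKws) = [] from
    List.filter_eq_nil_iff.mpr (fun w hw => by
      fin_cases hw <;> simp [beq_iff_eq] <;> assumption)]
  simp [beq_iff_eq, h1, h2, h3, h4, h5, h6, h7, h8, h9, h10, h11, PySem.Dict.get?]

-- generic facts about the dedup-append inner loop
lemma mem_foldl_addIf (ws : List String) (C : String → Bool) (acc : List String) (x : String) :
    x ∈ ws.foldl (fun a w => if !a.contains w && C w then a ++ [w] else a) acc ↔
      x ∈ acc ∨ (x ∈ ws ∧ C x = true) := by
  induction ws generalizing acc with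
  | nil => simp
  | cons w t ih =>
    simp only [List.foldl_cons]
    by_cases hw : (!acc.contains w && C w) = true
    · rw [if_pos hw, ih]
      simp only [Bool.and_eq_true, Bool.not_eq_true'] at hw
      obtain ⟨h1, h2⟩ := hw
      simp only [List.mem_append, List.mem_cons, List.not_mem_nil, or_false]
      constructor
      · rintro ((h | h) | ⟨h, hc⟩)
        · exact Or.inl h
        · exact Or.inr ⟨Or.inl h, h ▸ h2⟩
        · exact Or.inr ⟨Or.inr h, hc⟩
      · rintro (h | ⟨h | h, hc⟩)
        · exact Or.inl (Or.inl h)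
        · exact Or.inl (Or.inr h)
        · exact Or.inr ⟨h, hc⟩
    · rw [if_neg hw, ih]
      constructor
      · rintro (h | h)
        · exact Or.inl h
        · exact Or.inr ⟨List.mem_cons_of_mem _ h.1, h.2⟩
      · rintro (h | ⟨h, hc⟩)
        · exact Or.inl h
        · rcases List.mem_cons.mp h with rfl | h'
          · by_cases hmem : x ∈ acc
            · exact Or.inl hmem
            · exact absurd (by simp [hc, hmem] : (!acc.contains x && C x) = true) hw
          · exact Or.inr ⟨h', hc⟩

lemma nodup_foldl_addIf (ws : List String) (C : String → Bool) (acc : List String)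
    (h : acc.Nodup) :
    (ws.foldl (fun a w => if !a.contains w && C w then a ++ [w] else a) acc).Nodup := by
  induction ws generalizing acc with
  | nil => exact h
  | cons w t ih =>
    simp only [List.foldl_cons]
    by_cases hw : (!acc.contains w && C w) = true
    · rw [if_pos hw]
      apply ih
      simp only [Bool.and_eq_true, Bool.not_eq_true'] at hw
      have : w ∉ acc := by intro hm; rw [← List.contains_iff_mem, hw.1] at hm; cases hm
      exact h.append (List.nodup_singleton _) (fun a ha hb => by
        simp only [List.mem_singleton] at hb
        exact this (hb ▸ ha))
    · rw [if_neg hw]; exact ih _ h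

-- the scan over one headline: what ends up in found, position list generalized
lemma mem_outer (hc : List Char) (L : List (Int × Char))
    (hL : ∀ p ∈ L, (hc.drop p.1.toNat).head? = some p.2) (acc : List String) (x : String) :
    x ∈ L.foldl (fun found p =>
      ((pvIdx.get? p.2).getD []).foldl (fun found w =>
        if !found.contains w && PySem.Chars.startswith (hc.drop p.1.toNat) w.toList
        then found ++ [w] else found) found) acc ↔
      x ∈ acc ∨ ∃ p ∈ L, x ∈ pvKws ∧ PySem.Chars.startswith (hc.drop p.1.toNat) x.toList = true := by
  induction L generalizing acc with
  | nil => simp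
  | cons q t ih =>
    simp only [List.foldl_cons]
    rw [ih (fun p hp => hL p (List.mem_cons_of_mem _ hp)), mem_foldl_addIf]
    have hq := hL q (List.mem_cons_self ..)
    have hstep : (x ∈ (pvIdx.get? q.2).getD [] ∧ PySem.Chars.startswith (hc.drop q.1.toNat) x.toList = true)
        ↔ (x ∈ pvKws ∧ PySem.Chars.startswith (hc.drop q.1.toNat) x.toList = true) := by
      rw [idx_getD, List.mem_filter]
      constructor
      · rintro ⟨⟨hk, _⟩, hs⟩; exact ⟨hk, hs⟩
      · rintro ⟨hk, hs⟩
        refine ⟨⟨hk, ?_⟩, hs⟩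
        obtain ⟨a, tl, hx⟩ : ∃ a tl, x.toList = a :: tl := by
          cases hxl : x.toList with
          | nil => exact absurd hxl (kws_nonempty x hk)
          | cons a tl => exact ⟨a, tl, rfl⟩
        have hpre := (PySem.Chars.startswith_iff _ _).mp hs
        rw [hx] at hpre
        obtain ⟨r, hr⟩ := hpre
        have : (hc.drop q.1.toNat).head? = some a := by rw [← hr]; rfl
        rw [this] at hq
        simp [hx, Option.some.injEq] at hq ⊢
        exact hq
    constructor
    · rintro ((h | h) | ⟨p, hp, hx⟩)
      · exact Or.inl h
      · exact Or.inr ⟨q, List.mem_cons_self .., hstep.mp h⟩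
      · exact Or.inr ⟨p, List.mem_cons_of_mem _ hp, hx⟩
    · rintro (h | ⟨p, hp, hx⟩)
      · exact Or.inl (Or.inl h)
      · rcases List.mem_cons.mp hp with rfl | hp'
        · exact Or.inl (Or.inr (hstep.mpr hx))
        · exact Or.inr ⟨p, hp', hx⟩

-- found collects exactly the keywords occurring in the headline
lemma mem_pvFound (hc : List Char) (x : String) :
    x ∈ pvFound hc ↔ x ∈ pvKws ∧ PySem.Chars.isIn x.toList hc = true := by
  unfold pvFound
  rw [mem_outer hc _ (fun p hp => ?_)]
  · simp only [List.not_mem_nil, false_or]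
    constructor
    · rintro ⟨p, hp, hk, hs⟩
      exact ⟨hk, (PySem.Chars.exists_prefix_drop_iff_isIn _ _).mp
        ⟨p.1.toNat, (PySem.Chars.startswith_iff _ _).mp hs⟩⟩
    · rintro ⟨hk, hin⟩
      obtain ⟨j, hj⟩ := (PySem.Chars.exists_prefix_drop_iff_isIn _ _).mpr hin
      have hjlt : j < hc.length := by
        by_contra hge
        rw [List.drop_eq_nil_of_le (by omega)] at hj
        exact kws_nonempty x hk (List.prefix_nil.mp hj)
      refine ⟨((j : Int), hc[j]), ?_, hk, (PySem.Chars.startswith_iff _ _).mpr (by simpa using hj)⟩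
      rw [PySem.List.mem_enumerate_iff]
      exact ⟨j, hjlt, by simp⟩
  · rw [PySem.List.mem_enumerate_iff] at hp
    obtain ⟨k, hk, rfl⟩ := hp
    simp [List.head?_drop]

lemma nodup_pvFound (hc : List Char) : (pvFound hc).Nodup := by
  unfold pvFound
  generalize (PySem.List.enumerate hc : List (Int × Char)) = L
  have gen : ∀ (L : List (Int × Char)) (acc : List String), acc.Nodup →
      (L.foldl (fun found p =>
        ((pvIdx.get? p.2).getD []).foldl (fun found w =>
          if !found.contains w && PySem.Chars.startswith (hc.drop p.1.toNat) w.toList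
          then found ++ [w] else found) found) acc).Nodup := by
    intro L
    induction L with
    | nil => exact fun _ h => h
    | cons q t ih => exact fun acc h => ih _ (nodup_foldl_addIf _ _ _ h)
  exact gen L [] List.nodup_nil

lemma sum_pvFound (hc : List Char) :
    ((pvFound hc).map (fun w => pvWD.getD w 0)).sum =
      (pvBull.map (fun w => pvInd w hc)).sum - (pvBear.map (fun w => pvInd w hc)).sum := by
  have hperm : (pvFound hc).Perm (pvKws.filter (fun w => PySem.Chars.isIn w.toList hc)) :=
    (List.perm_ext_iff_of_nodup (nodup_pvFound hc) (kws_nodup.filter _)).mpr (fun x => by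
      rw [mem_pvFound, List.mem_filter])
  rw [(hperm.map _).sum_eq]
  rw [show pvKws = pvBull ++ pvBear from rfl, List.filter_append, List.map_append, List.sum_append]
  rw [List.map_congr_left (fun w hw => wd_bull w (List.mem_filter.mp hw).1),
      List.map_congr_left (fun w hw => wd_bear w (List.mem_filter.mp hw).1)]
  simp only [pvInd]
  rw [PySem.List.sum_map_ite_one_zero, PySem.List.sum_map_ite_one_zero]
  simp [← List.countP_eq_length_filter]
  ring

-- ===== VERDICT (by name: the statement is the Claim_ definition above) =====
set_option maxHeartbeats 1000000 in
theorem get_sentiment_score_spec : Claim_equal_get_sentiment_score := by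
  intro nl _ _
  unfold Spec_get_sentiment_score
  rw [a_eq, alt_eq]
  congr 1
  funext score item
  rw [sum_pvFound]
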